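-- pv_equiv track=rewrite | github.com/wzygxr/shuati | class043_ShortestPathAlgorithm/Code03_SmallMultiple.py | bfs
-- ===== SOURCE A (Python) =====
-- from collections import deque
--
-- def bfs(k):
--     # 使用双端队列实现01-BFS
--     dq = deque()
--     visited = [False] * k
--
--     # 初始状态：余数为1，数位和为1
--     dq.appendleft((1, 1))
--
--     while dq:
--         mod, cost = dq.popleft()
--
--         if not visited[mod]:
--             visited[mod] = True
--
--             if mod == 0:
--                 return cost
--
--             # 两种转移方式：
--             # 1. 乘以10（在末尾加0），数位和不变，边权为0
--             dq.appendleft(((mod * 10) % k, cost))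
--             # 2. 加1（末尾数位加1），数位和加1，边权为1
--             dq.append(((mod + 1) % k, cost + 1))
--
--     return -1
-- ===== SOURCE B (Python) =====
-- def bfs(k):
--     # Level-synchronous BFS on remainders, following *10-chains directly
--     # (the *10 successor is unique, so each 0-weight "closure" is a chain);
--     # no deque and no (mod, cost) pairs.
--     seen = [False] * k
--     level = []
--     m = 1
--     while not seen[m]:
--         seen[m] = True
--         level.append(m)
--         m = (m * 10) % k
--     cost = 1
--     while level:
--         if 0 in level:
--             return cost
--         nxt = []
--         for x in level:
--             m = (x + 1) % k
--             while not seen[m]: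
--                 seen[m] = True
--                 nxt.append(m)
--                 m = (m * 10) % k
--         level = nxt
--         cost += 1
--     return -1
-- ===== Notes on version B (the rewrite author's own statement) =====
-- stated objective: alternative
-- what changed: Replaces the 01-BFS over a deque of (remainder, cost) pairs by a level-synchronous BFS that keeps no costs in the queue: each round saturates the unique times-10-successor chains of the plus-1-neighbours of the current level, so the deque and the per-node cost pairs disappear.
import Mathlib
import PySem

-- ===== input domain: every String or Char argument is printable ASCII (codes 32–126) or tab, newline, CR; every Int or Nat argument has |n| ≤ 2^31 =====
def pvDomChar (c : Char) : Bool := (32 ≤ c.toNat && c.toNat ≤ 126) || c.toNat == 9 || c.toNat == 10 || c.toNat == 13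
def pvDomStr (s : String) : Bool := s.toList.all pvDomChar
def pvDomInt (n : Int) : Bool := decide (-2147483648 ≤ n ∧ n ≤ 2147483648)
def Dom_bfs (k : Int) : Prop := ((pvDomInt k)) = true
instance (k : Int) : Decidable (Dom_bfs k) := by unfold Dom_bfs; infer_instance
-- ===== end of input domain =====

-- B replaces A's 01-BFS deque of (remainder, cost) pairs by a level-synchronous BFS
-- following the unique *10-successor chains; alternative structure, same O(k) cost.

-- ===== PORT A =====
-- 01-BFS with a deque of (mod, cost) pairs; fuel bounds the number of pops
-- (2*k + 2 is proved sufficient on Pre_; the 0-fuel branch is never reached there).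
def bfsLoopA (k : Int) (fuel : Nat) (dq : List (Int × Int)) (visited : List Bool) : Int :=
  match fuel with
  | 0 => 0
  | fuel + 1 =>
    match dq with
    | [] => -1
    | (md, cost) :: rest =>
      -- `visited[md]`: inside Pre_ always 0 ≤ md < len(visited) (IndexError excluded by Pre_)
      if PySem.List.pyGetD visited md false = false then
        -- `visited[md] = True` (exact for 0 ≤ md < len, which Pre_ guarantees)
        let visited' := PySem.List.pySetD visited md true
        if md = 0 then cost
        else
          bfsLoopA k fuel
            ((PySem.Int.mod (md * 10) k, cost) :: (rest ++ [(PySem.Int.mod (md + 1) k, cost + 1)]))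
            visited'
      else bfsLoopA k fuel rest visited

def bfs (k : Int) : Int :=
  bfsLoopA k (2 * k.toNat + 2) [(1, 1)] (List.replicate k.toNat false)

-- ===== PORT B =====
-- `while not seen[m]: seen[m] = True; acc.append(m); m = (m*10) % k`
-- (fuel k+1 is proved sufficient on Pre_: each step marks a fresh remainder)
def chainB (k : Int) (fuel : Nat) (m : Int) (seen : List Bool) (acc : List Int) : List Bool × List Int :=
  match fuel with
  | 0 => (seen, acc)
  | fuel + 1 =>
    if PySem.List.pyGetD seen m false = false then
      chainB k fuel (PySem.Int.mod (m * 10) k) (PySem.List.pySetD seen m true) (acc ++ [m])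
    else (seen, acc)

-- outer `while level:` loop; the `for x in level:` loop is the foldl
def bfsLoopB (k : Int) (fuel : Nat) (level : List Int) (seen : List Bool) (cost : Int) : Int :=
  match fuel with
  | 0 => 0
  | fuel + 1 =>
    match level with
    | [] => -1
    | _ :: _ =>
      if (0 : Int) ∈ level then cost
      else
        let p := level.foldl
          (fun (p : List Bool × List Int) x => chainB k (k.toNat + 1) (PySem.Int.mod (x + 1) k) p.1 p.2)
          (seen, [])
        bfsLoopB k fuel p.2 p.1 (cost + 1)

def bfs_alt (k : Int) : Int :=
  let p := chainB k (k.toNat + 1) 1 (List.replicate k.toNat false) []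
  bfsLoopB k (k.toNat + 2) p.2 p.1 1

-- ===== PRECONDITION & SPEC =====
-- Pre_ excludes k ≤ 1, on which the Python A raises IndexError (visited[1] with len(visited) = max(k,0) ≤ 1); B raises there too.
def Pre_bfs (k : Int) : Prop := 2 ≤ k
instance (k : Int) : Decidable (Pre_bfs k) := by unfold Pre_bfs; infer_instance

def pvWitness_bfs : Int := 7

def Spec_bfs (k : Int) (out : Int) : Prop := out = bfs_alt k
instance (k : Int) (out : Int) : Decidable (Spec_bfs k out) := by unfold Spec_bfs; infer_instance

-- ===== CLAIM (what is proved, stated in full; the proofs are below) =====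
def Claim_equal_bfs : Prop := ∀ (k : Int), Dom_bfs k → Pre_bfs k → Spec_bfs k (bfs k)

-- ===== LEMMAS AND PROOFS =====

-- iterated *10 step
def pvMulIter (k : Int) : Nat → Int → Int
  | 0, m => m
  | j + 1, m => (pvMulIter k j m * 10) % k

-- remainders reachable from 1 with at most c weight-1 (+1) edges and any number of *10 edges
inductive PvLv (k : Int) : Nat → Int → Prop
  | base (c) : PvLv k c 1
  | mul {c m} : PvLv k c m → PvLv k c ((m * 10) % k)
  | succ {c m} : PvLv k c m → PvLv k (c + 1) ((m + 1) % k)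

-- the visited/seen set denoted by a Bool list
def pvVp (seen : List Bool) (x : Int) : Prop := 0 ≤ x ∧ seen.getD x.toNat false = true

-- least number of +1-edges needed to reach remainder 0
noncomputable def pvD (k : Int) : Nat := sInf {c | PvLv k c 0}

theorem lv_succ_of {k : Int} {c : Nat} {m : Int} (h : PvLv k c m) : PvLv k (c + 1) m := by
  induction h with
  | base c => exact PvLv.base _
  | mul _ ih => exact PvLv.mul ih
  | succ _ ih => exact PvLv.succ ih

theorem lv_mono_le {k : Int} {c c' : Nat} {m : Int} (hle : c ≤ c') (h : PvLv k c m) : PvLv k c' m := by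
  induction c', hle using Nat.le_induction with
  | base => exact h
  | succ _ _ ih => exact lv_succ_of ih

theorem lv_range {k : Int} (hk : 2 ≤ k) {c : Nat} {m : Int} (h : PvLv k c m) : 0 ≤ m ∧ m < k := by
  induction h with
  | base c => omega
  | mul _ _ => exact ⟨Int.emod_nonneg _ (by omega), Int.emod_lt_of_pos _ (by omega)⟩
  | succ _ _ => exact ⟨Int.emod_nonneg _ (by omega), Int.emod_lt_of_pos _ (by omega)⟩

theorem lv_mulIter {k : Int} {c : Nat} {m : Int} (h : PvLv k c m) (j : Nat) :
    PvLv k c (pvMulIter k j m) := by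
  induction j with
  | zero => exact h
  | succ j ih => exact PvLv.mul ih

theorem mulIter_shift (k : Int) (j : Nat) (m : Int) :
    pvMulIter k (j + 1) m = pvMulIter k j ((m * 10) % k) := by
  induction j with
  | zero => rfl
  | succ j ih => simp only [pvMulIter] at *; rw [ih]

-- level 0 is exactly the *10-chain of 1
theorem lv_zero {k : Int} {m : Int} : PvLv k 0 m ↔ ∃ j, m = pvMulIter k j 1 := by
  constructor
  · intro h
    generalize hc : (0 : Nat) = c at h
    induction h with
    | base c => exact ⟨0, rfl⟩
    | mul _ ih =>
      obtain ⟨j, hj⟩ := ih hc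
      exact ⟨j + 1, by simp [pvMulIter, hj]⟩
    | succ _ ih => omega
  · rintro ⟨j, rfl⟩
    exact lv_mulIter (PvLv.base 0) j

-- the level recurrence: Lv (ℓ+1) = Lv ℓ ∪ *10-closure of (+1)-images of the new nodes of level ℓ
theorem lv_recurrence {k : Int} (ℓ : Nat) (m : Int) :
    PvLv k (ℓ + 1) m ↔
      (PvLv k ℓ m ∨ ∃ j x, (PvLv k ℓ x ∧ ¬ ∃ c < ℓ, PvLv k c x) ∧ m = pvMulIter k j ((x + 1) % k)) := by
  constructor
  · intro h
    have aux : ∀ c m', PvLv k c m' → ∀ ℓ' : Nat, c = ℓ' + 1 →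
        (PvLv k ℓ' m' ∨ ∃ j x, (PvLv k ℓ' x ∧ ¬ ∃ c' < ℓ', PvLv k c' x) ∧
          m' = pvMulIter k j ((x + 1) % k)) := by
      intro c m' h
      induction h with
      | base c => exact fun ℓ' _ => Or.inl (PvLv.base ℓ')
      | mul _ ih =>
        intro ℓ' hc
        rcases ih ℓ' hc with h' | ⟨j, x, hx, rfl⟩
        · exact Or.inl (PvLv.mul h')
        · exact Or.inr ⟨j + 1, x, hx, rfl⟩
      | @succ c' m'' h _ =>
        intro ℓ' hc
        by_cases hP : ∃ c'' < ℓ', PvLv k c'' m''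
        · obtain ⟨c'', hcℓ, h'⟩ := hP
          exact Or.inl (lv_mono_le (by omega) (PvLv.succ h'))
        · exact Or.inr ⟨0, m'', ⟨lv_mono_le (by omega) h, hP⟩, rfl⟩
    exact aux _ _ h ℓ rfl
  · rintro (h | ⟨j, x, ⟨hx, _⟩, rfl⟩)
    · exact lv_succ_of h
    · exact lv_mulIter (PvLv.succ hx) j

theorem emod_add_one (k : Int) (x : Int) : (x % k + 1) % k = (x + 1) % k := by
  conv_rhs => rw [Int.add_emod]
  rw [Int.add_emod (x % k) 1, Int.emod_emod_of_dvd _ dvd_rfl]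

theorem lv_zero_at {k : Int} (hk : 2 ≤ k) : PvLv k (k.toNat - 1) 0 := by
  have aux : ∀ c : Nat, PvLv k c ((1 + c) % k) := by
    intro c
    induction c with
    | zero =>
      have h1 : ((1 : Int) + ((0 : Nat) : Int)) % k = 1 := Int.emod_eq_of_lt (by omega) (by omega)
      rw [h1]; exact PvLv.base 0
    | succ c ih =>
      have := PvLv.succ ih
      rwa [emod_add_one, add_assoc] at this
  have h := aux (k.toNat - 1)
  have hc : ((1 : Int) + ((k.toNat - 1 : Nat) : Int)) = k := by omega
  rwa [hc, Int.emod_self] at h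

theorem lv_exists_zero {k : Int} (hk : 2 ≤ k) : ∃ c, PvLv k c 0 := ⟨_, lv_zero_at hk⟩

-- if level ℓ adds nothing new, every level collapses below ℓ, in particular 0's
theorem lv_sat {k : Int} (hk : 2 ≤ k) (ℓ : Nat)
    (hsat : ∀ m, PvLv k ℓ m → ∃ c < ℓ, PvLv k c m) : ∃ c < ℓ, PvLv k c 0 := by
  match ℓ with
  | 0 => exact absurd (hsat 1 (PvLv.base 0)) (by simp)
  | ℓ + 1 =>
    have hcol : ∀ m, PvLv k (ℓ + 1) m → PvLv k ℓ m := by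
      intro m h
      obtain ⟨c, hc, h'⟩ := hsat m h
      exact lv_mono_le (by omega) h'
    have hall : ∀ c m, PvLv k c m → PvLv k ℓ m := by
      intro c m h
      induction h with
      | base c => exact PvLv.base _
      | mul _ ih => exact PvLv.mul ih
      | succ _ ih => exact hcol _ (PvLv.succ ih)
    obtain ⟨c, h0⟩ := lv_exists_zero hk
    exact ⟨ℓ, by omega, hall c 0 h0⟩

theorem pvD_lv {k : Int} (hk : 2 ≤ k) : PvLv k (pvD k) 0 := by
  have h : {c | PvLv k c 0}.Nonempty := lv_exists_zero hk
  exact Nat.sInf_mem h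

theorem pvD_min {k : Int} (hk : 2 ≤ k) {c : Nat} (h : PvLv k c 0) : pvD k ≤ c :=
  Nat.sInf_le h

theorem pvD_le {k : Int} (hk : 2 ≤ k) : pvD k ≤ k.toNat - 1 :=
  pvD_min hk (lv_zero_at hk)

theorem pvD_eq {k : Int} (hk : 2 ≤ k) {ℓ : Nat} (h0 : PvLv k ℓ 0)
    (hnot : ¬ ∃ c < ℓ, PvLv k c 0) : pvD k = ℓ := by
  have h1 : pvD k ≤ ℓ := pvD_min hk h0
  rcases Nat.lt_or_ge (pvD k) ℓ with h | h
  · exact absurd ⟨pvD k, h, pvD_lv hk⟩ hnot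
  · omega

-- === Bool-list visited-set toolkit ===

theorem vp_set {seen : List Bool} {m : Int} (hm : 0 ≤ m) (hlt : m.toNat < seen.length) (x : Int) :
    pvVp (seen.set m.toNat true) x ↔ (pvVp seen x ∨ x = m) := by
  simp only [pvVp]
  constructor
  · rintro ⟨hx0, hx⟩
    by_cases hxm : x = m
    · exact Or.inr hxm
    · refine Or.inl ⟨hx0, ?_⟩
      rw [List.getD_eq_getElem?_getD, List.getElem?_set_ne (by omega),
        ← List.getD_eq_getElem?_getD] at hx
      exact hx
  · rintro (⟨hx0, hx⟩ | rfl)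
    · by_cases hxm : x = m
      · subst hxm
        exact ⟨hx0, by rw [List.getD_eq_getElem?_getD, List.getElem?_set_self hlt]; rfl⟩
      · refine ⟨hx0, ?_⟩
        rw [List.getD_eq_getElem?_getD, List.getElem?_set_ne (by omega),
          ← List.getD_eq_getElem?_getD]
        exact hx
    · exact ⟨hm, by rw [List.getD_eq_getElem?_getD, List.getElem?_set_self hlt]; rfl⟩

theorem vp_replicate (n : Nat) (x : Int) : ¬ pvVp (List.replicate n false) x := by
  rintro ⟨hx0, hx⟩
  rw [List.getD_eq_getElem?_getD, List.getElem?_replicate] at hx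
  revert hx; split <;> simp

theorem count_set_true {seen : List Bool} {i : Nat} (hi : i < seen.length)
    (h : seen.getD i false = false) :
    (seen.set i true).count true = seen.count true + 1 := by
  induction seen generalizing i with
  | nil => simp at hi
  | cons b t ih =>
    match i with
    | 0 =>
      simp only [List.getD_eq_getElem?_getD] at h
      simp at h
      simp [List.set, List.count_cons, h]
    | i + 1 =>
      have h' : t.getD i false = false := by
        simpa [List.getD_eq_getElem?_getD] using h
      simp [List.set, List.count_cons, ih (by simpa using hi) h']
      omega

-- === A-side: the deque loop ===

-- the loop invariant of A's 01-BFS: the deque splits as F ++ R (current level /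
-- next level), visited ∪ *10-closure(F-nodes) is exactly level ℓ, visited is
-- *10-closed except just behind the deque head, and R holds the (+1)-successors
-- of the fresh level-ℓ nodes visited so far
def InvA (k : Int) (ℓ : Nat) (F R : List (Int × Int)) (vis : List Bool) : Prop :=
  vis.length = k.toNat ∧
  (∀ p ∈ F, p.2 = (ℓ : Int) + 1) ∧
  (∀ p ∈ R, p.2 = (ℓ : Int) + 2) ∧
  (∀ p ∈ F ++ R, 0 ≤ p.1 ∧ p.1 < k) ∧
  (∀ m, (pvVp vis m ∨ ∃ j x c, (x, c) ∈ F ∧ m = pvMulIter k j x) ↔ PvLv k ℓ m) ∧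
  (∀ x, pvVp vis x → (pvVp vis ((x * 10) % k) ∨ ∃ c rest, F = (((x * 10) % k), c) :: rest)) ∧
  (∀ y, (∃ x, pvVp vis x ∧ ¬ (∃ c < ℓ, PvLv k c x) ∧ y = (x + 1) % k) ↔ ∃ c, (y, c) ∈ R) ∧
  (∀ m, (∃ c < ℓ, PvLv k c m) → pvVp vis m) ∧
  ¬ pvVp vis 0

theorem emptyA {k : Int} (hk : 2 ≤ k) {ℓ : Nat} {vis : List Bool}
    (hinv : InvA k ℓ [] [] vis) : False := by
  obtain ⟨hlen, h2, h3, h4, h5, h6, h7, h8, h9⟩ := hinv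
  have hvp : ∀ m, pvVp vis m ↔ PvLv k ℓ m := by
    intro m
    rw [← h5 m]
    simp
  have hsat : ∀ m, PvLv k ℓ m → ∃ c < ℓ, PvLv k c m := by
    intro m hm
    by_contra hP
    have := (h7 ((m + 1) % k)).1 ⟨m, (hvp m).2 hm, hP, rfl⟩
    simp at this
  exact h9 (h8 0 (lv_sat hk ℓ hsat))

theorem shiftA {k : Int} (hk : 2 ≤ k) {ℓ : Nat} {R : List (Int × Int)} {vis : List Bool}
    (hinv : InvA k ℓ [] R vis) : InvA k (ℓ + 1) R [] vis := by
  obtain ⟨hlen, h2, h3, h4, h5, h6, h7, h8, h9⟩ := hinv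
  have hvp : ∀ m, pvVp vis m ↔ PvLv k ℓ m := by
    intro m
    rw [← h5 m]
    simp
  refine ⟨hlen, ?_, by simp, by simpa using h4, ?_, ?_, ?_, ?_, h9⟩
  · intro p hp
    rw [h3 p hp]
    push_cast
    ring
  · intro m
    rw [lv_recurrence ℓ m]
    constructor
    · rintro (hm | ⟨j, y, c, hyc, rfl⟩)
      · exact Or.inl ((hvp m).1 hm)
      · obtain ⟨x, hx, hxP, rfl⟩ := (h7 y).2 ⟨c, hyc⟩
        exact Or.inr ⟨j, x, ⟨(hvp x).1 hx, hxP⟩, rfl⟩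
    · rintro (hm | ⟨j, x, ⟨hx, hxP⟩, rfl⟩)
      · exact Or.inl ((hvp m).2 hm)
      · obtain ⟨c, hc⟩ := (h7 ((x + 1) % k)).1 ⟨x, (hvp x).2 hx, hxP, rfl⟩
        exact Or.inr ⟨j, (x + 1) % k, c, hc, rfl⟩
  · intro x hx
    exact Or.inl ((hvp _).2 (PvLv.mul ((hvp x).1 hx)))
  · intro y
    constructor
    · rintro ⟨x, hx, hxP, rfl⟩
      exact absurd ⟨ℓ, by omega, (hvp x).1 hx⟩ hxP
    · rintro ⟨c, hc⟩
      simp at hc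
  · intro m ⟨c, hc, hm⟩
    exact (hvp m).2 (lv_mono_le (by omega) hm)

theorem popA {k : Int} (hk : 2 ≤ k) (fuel : Nat)
    (ihf : ∀ (ℓ : Nat) (F R : List (Int × Int)) (vis : List Bool), InvA k ℓ F R vis →
      2 * (k.toNat - vis.count true) + (F ++ R).length ≤ fuel →
      bfsLoopA k fuel (F ++ R) vis = (pvD k : Int) + 1) :
    ∀ (ℓ : Nat) (md cost : Int) (F' R : List (Int × Int)) (vis : List Bool),
      InvA k ℓ ((md, cost) :: F') R vis →
      2 * (k.toNat - vis.count true) + (((md, cost) :: F') ++ R).length ≤ fuel + 1 →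
      bfsLoopA k (fuel + 1) (((md, cost) :: F') ++ R) vis = (pvD k : Int) + 1 := by
  intro ℓ md cost F' R vis hinv hfuel
  obtain ⟨hlen, h2, h3, h4, h5, h6, h7, h8, h9⟩ := hinv
  have hk0 : (0 : Int) < k := by omega
  have hmd := h4 (md, cost) (by simp)
  have hmi : md.toNat < vis.length := by omega
  have hcost : cost = (ℓ : Int) + 1 := h2 (md, cost) (by simp)
  simp only [List.cons_append, bfsLoopA]
  rw [PySem.List.pyGetD_of_nonneg vis false hmd.1]
  by_cases hb : vis.getD md.toNat false = false
  · rw [if_pos hb, PySem.List.pySetD_of_nonneg vis true hmd.1]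
    have hvp' : ∀ x, pvVp (vis.set md.toNat true) x ↔ (pvVp vis x ∨ x = md) :=
      fun x => vp_set hmd.1 hmi x
    have hmdnew : ¬ pvVp vis md := by
      rintro ⟨_, h⟩
      rw [h] at hb
      simp at hb
    have hmdLv : PvLv k ℓ md := (h5 md).1 (Or.inr ⟨0, md, cost, by simp, rfl⟩)
    have hmdP : ¬ ∃ c < ℓ, PvLv k c md := fun hP => hmdnew (h8 md hP)
    have hcnt : (vis.set md.toNat true).count true = vis.count true + 1 := count_set_true hmi hb
    have hcle : (vis.set md.toNat true).count true ≤ vis.length := by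
      have := List.count_le_length (a := true) (l := vis.set md.toNat true)
      simpa using this
    by_cases hmd0 : md = 0
    · rw [if_pos hmd0]
      subst hmd0
      rw [hcost, pvD_eq hk hmdLv (by simpa using hmdP)]
    · rw [if_neg hmd0]
      rw [PySem.Int.mod_eq_emod_of_pos hk0, PySem.Int.mod_eq_emod_of_pos hk0]
      have hre : ((md * 10 % k, cost) :: ((F' ++ R) ++ [((md + 1) % k, cost + 1)])) =
          ((md * 10 % k, cost) :: F') ++ (R ++ [((md + 1) % k, cost + 1)]) := by
        simp [List.append_assoc]
      rw [hre]
      apply ihf ℓ _ _ _ ?_ ?_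
      · -- the new invariant
        have h6' : ∀ x, pvVp (vis.set md.toNat true) x →
            (pvVp (vis.set md.toNat true) ((x * 10) % k) ∨
              ∃ c rest, ((md * 10 % k, cost) :: F') = (((x * 10) % k), c) :: rest) := by
          intro x hx
          rcases (hvp' x).1 hx with hx' | rfl
          · rcases h6 x hx' with h10 | ⟨c, rest, hFR⟩
            · exact Or.inl ((hvp' _).2 (Or.inl h10))
            · have : (x * 10) % k = md := by
                have := congrArg (fun l => l.head?) hFR
                simp at this
                exact this.1.symm
              exact Or.inl (this ▸ (hvp' md).2 (Or.inr rfl))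
          · exact Or.inr ⟨cost, F', rfl⟩
        have hmem4 : ∀ p, p ∈ ((md * 10 % k, cost) :: F') ++ (R ++ [((md + 1) % k, cost + 1)]) →
            (p = (md * 10 % k, cost) ∨ p ∈ F' ∨ p ∈ R ∨ p = ((md + 1) % k, cost + 1)) := by
          intro p hp
          simp only [List.cons_append, List.mem_cons, List.mem_append, List.mem_singleton] at hp
          tauto
        refine ⟨by simpa using hlen, ?_, ?_, ?_, ?_, h6', ?_, ?_, ?_⟩
        · intro p hp
          rcases List.mem_cons.1 hp with rfl | hp
          · exact hcost
          · exact h2 p (List.mem_cons_of_mem _ hp)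
        · intro p hp
          rcases List.mem_append.1 hp with hp | hp
          · exact h3 p hp
          · simp only [List.mem_singleton] at hp
            rw [hp, hcost]
            simp
            ring
        · intro p hp
          rcases hmem4 p hp with rfl | hp | hp | rfl
          · exact ⟨Int.emod_nonneg _ (by omega), Int.emod_lt_of_pos _ hk0⟩
          · exact h4 p (by simp [hp])
          · exact h4 p (by simp [hp])
          · exact ⟨Int.emod_nonneg _ (by omega), Int.emod_lt_of_pos _ hk0⟩
        · intro m
          rw [← h5 m]
          constructor
          · rintro (hm | ⟨j, x, c, hxc, rfl⟩)
            · rcases (hvp' m).1 hm with hm' | heq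
              · exact Or.inl hm'
              · exact Or.inr ⟨0, md, cost, by simp, heq⟩
            · rcases List.mem_cons.1 hxc with hx | hx
              · have hx1 : x = md * 10 % k := (Prod.mk.injEq .. ▸ hx).1 ▸ rfl
                refine Or.inr ⟨j + 1, md, cost, by simp, ?_⟩
                rw [mulIter_shift]
                cases hx
                rfl
              · exact Or.inr ⟨j, x, c, by simp [hx], rfl⟩
          · rintro (hm | ⟨j, x, c, hxc, rfl⟩)
            · exact Or.inl ((hvp' m).2 (Or.inl hm))
            · rcases List.mem_cons.1 hxc with hx | hx
              · cases hx
                match j with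
                | 0 => exact Or.inl ((hvp' md).2 (Or.inr rfl))
                | j + 1 =>
                  refine Or.inr ⟨j, md * 10 % k, cost, by simp, ?_⟩
                  rw [mulIter_shift]
              · exact Or.inr ⟨j, x, c, by simp [hx], rfl⟩
        · intro y
          constructor
          · rintro ⟨x, hx, hxP, rfl⟩
            rcases (hvp' x).1 hx with hx' | rfl
            · obtain ⟨c, hc⟩ := (h7 _).1 ⟨x, hx', hxP, rfl⟩
              exact ⟨c, by simp [hc]⟩
            · exact ⟨cost + 1, by simp⟩
          · rintro ⟨c, hc⟩
            rcases List.mem_append.1 hc with hc | hc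
            · obtain ⟨x, hx, hxP, rfl⟩ := (h7 y).2 ⟨c, hc⟩
              exact ⟨x, (hvp' x).2 (Or.inl hx), hxP, rfl⟩
            · simp at hc
              exact ⟨md, (hvp' md).2 (Or.inr rfl), hmdP, hc.1⟩
        · intro m hm
          exact (hvp' m).2 (Or.inl (h8 m hm))
        · intro h0
          rcases (hvp' 0).1 h0 with h0' | h0'
          · exact h9 h0'
          · exact hmd0 h0'.symm
      · simp only [List.length_append, List.length_cons, List.length_nil, List.length_singleton] at hfuel ⊢
        rw [hcnt]
        rw [hcnt] at hcle
        rw [hlen] at hcle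
        omega
  · rw [if_neg hb]
    have hbt : vis.getD md.toNat false = true := by
      cases h : vis.getD md.toNat false
      · exact absurd h hb
      · rfl
    have hvmd : pvVp vis md := ⟨hmd.1, hbt⟩
    have h6' : ∀ x, pvVp vis x →
        (pvVp vis ((x * 10) % k) ∨ ∃ c rest, F' = (((x * 10) % k), c) :: rest) := by
      intro x hx
      rcases h6 x hx with h10 | ⟨c, rest, hFR⟩
      · exact Or.inl h10
      · have : (x * 10) % k = md := by
          have := congrArg (fun l => l.head?) hFR
          simp at this
          exact this.1.symm
        exact Or.inl (this ▸ hvmd)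
    have hchain : ∀ j, pvVp vis (pvMulIter k j md) ∨
        ∃ j' x c, (x, c) ∈ F' ∧ pvMulIter k j md = pvMulIter k j' x := by
      intro j
      induction j with
      | zero => exact Or.inl hvmd
      | succ j ihj =>
        rcases ihj with hv | ⟨j', x, c, hxc, heq⟩
        · rcases h6' _ hv with h10 | ⟨c, rest, hF'⟩
          · exact Or.inl (by simpa [pvMulIter] using h10)
          · refine Or.inr ⟨0, (pvMulIter k j md * 10) % k, c, ?_, rfl⟩
            rw [hF']
            simp
        · refine Or.inr ⟨j' + 1, x, c, hxc, ?_⟩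
          simp only [pvMulIter]
          rw [heq]
    apply ihf ℓ F' R vis ?_ ?_
    · refine ⟨hlen, fun p hp => h2 p (by simp [hp]), h3, fun p hp => h4 p (by
        rcases List.mem_append.1 hp with hp | hp
        · exact List.mem_append.2 (Or.inl (by simp [hp]))
        · exact List.mem_append.2 (Or.inr hp)), ?_, h6', h7, h8, h9⟩
      intro m
      rw [← h5 m]
      constructor
      · rintro (hm | ⟨j, x, c, hxc, rfl⟩)
        · exact Or.inl hm
        · exact Or.inr ⟨j, x, c, by simp [hxc], rfl⟩
      · rintro (hm | ⟨j, x, c, hxc, rfl⟩)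
        · exact Or.inl hm
        · rcases List.mem_cons.1 hxc with hx | hx
          · cases hx
            rcases hchain j with hv | ⟨j', x', c', hx'c, heq⟩
            · exact Or.inl hv
            · exact Or.inr ⟨j', x', c', hx'c, heq⟩
          · exact Or.inr ⟨j, x, c, hx, rfl⟩
    · simp only [List.length_append, List.length_cons] at hfuel ⊢
      omega

theorem loopA_spec {k : Int} (hk : 2 ≤ k) :
    ∀ (fuel : Nat) (ℓ : Nat) (F R : List (Int × Int)) (vis : List Bool),
      InvA k ℓ F R vis →
      2 * (k.toNat - vis.count true) + (F ++ R).length ≤ fuel →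
      bfsLoopA k fuel (F ++ R) vis = (pvD k : Int) + 1 := by
  intro fuel
  induction fuel with
  | zero =>
    intro ℓ F R vis hinv hfuel
    exfalso
    have hF : F = [] := by
      cases F
      · rfl
      · simp at hfuel
    have hR : R = [] := by
      cases R
      · rfl
      · simp [hF] at hfuel
    exact emptyA hk (hF ▸ hR ▸ hinv)
  | succ fuel ihf =>
    intro ℓ F R vis hinv hfuel
    match F with
    | [] =>
      match R with
      | [] => exact absurd hinv (fun h => emptyA hk h)
      | (md, cost) :: R' =>
        have hinv' := shiftA hk hinv
        have : ([] : List (Int × Int)) ++ ((md, cost) :: R') = ((md, cost) :: R') ++ [] := by simp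
        rw [this]
        apply popA hk fuel (ihf) (ℓ + 1) md cost R' [] vis hinv'
        simpa using hfuel
    | (md, cost) :: F' =>
      exact popA hk fuel ihf ℓ md cost F' R vis hinv hfuel

theorem bfs_eq {k : Int} (hk : 2 ≤ k) : bfs k = (pvD k : Int) + 1 := by
  unfold bfs
  have h : [((1 : Int), (1 : Int))] = [((1 : Int), (1 : Int))] ++ [] := by simp
  rw [h]
  apply loopA_spec hk (2 * k.toNat + 2) 0 [(1, 1)] [] (List.replicate k.toNat false) ?_ ?_
  · refine ⟨by simp, by simp, by simp, by simp; omega, ?_, ?_, ?_, by simp, vp_replicate _ 0⟩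
    · intro m
      rw [lv_zero]
      constructor
      · rintro (hm | ⟨j, x, c, hxc, rfl⟩)
        · exact absurd hm (vp_replicate _ m)
        · simp at hxc
          exact ⟨j, by rw [hxc.1]⟩
      · rintro ⟨j, rfl⟩
        exact Or.inr ⟨j, 1, 1, by simp, rfl⟩
    · intro x hx
      exact absurd hx (vp_replicate _ x)
    · intro y
      constructor
      · rintro ⟨x, hx, _⟩
        exact absurd hx (vp_replicate _ x)
      · rintro ⟨c, hc⟩
        simp at hc
  · simp [List.count_replicate]

-- === B-side: chain, fold, outer loop ===

theorem chainB_spec {k : Int} (hk : 2 ≤ k) :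
    ∀ (fuel : Nat) (m : Int) (seen : List Bool) (acc : List Int),
      seen.length = k.toNat → 0 ≤ m → m < k →
      (∀ x, pvVp seen x → (pvVp seen ((x * 10) % k) ∨ (x * 10) % k = m)) →
      k.toNat - seen.count true + 1 ≤ fuel →
      ∃ seen' new,
        chainB k fuel m seen acc = (seen', acc ++ new) ∧
        seen'.length = k.toNat ∧
        (∀ x, pvVp seen' x ↔ (pvVp seen x ∨ ∃ j, x = pvMulIter k j m)) ∧
        (∀ x, x ∈ new ↔ (pvVp seen' x ∧ ¬ pvVp seen x)) ∧
        (∀ x, pvVp seen' x → pvVp seen' ((x * 10) % k)) ∧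
        seen.count true ≤ seen'.count true := by
  intro fuel
  induction fuel with
  | zero => intro m seen acc _ _ _ _ hfuel; omega
  | succ fuel ih =>
    intro m seen acc hlen hm0 hmk hcl hfuel
    have hk0 : (0 : Int) < k := by omega
    have hmi : m.toNat < seen.length := by omega
    simp only [chainB, PySem.List.pyGetD_of_nonneg seen false hm0]
    by_cases hb : seen.getD m.toNat false = false
    · rw [if_pos hb, PySem.List.pySetD_of_nonneg seen true hm0,
        PySem.Int.mod_eq_emod_of_pos hk0]
      set seen₁ := seen.set m.toNat true with hseen₁
      have hvp₁ : ∀ x, pvVp seen₁ x ↔ (pvVp seen x ∨ x = m) := fun x => vp_set hm0 hmi x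
      have hvm₁ : pvVp seen₁ m := (hvp₁ m).2 (Or.inr rfl)
      have hlen₁ : seen₁.length = k.toNat := by simp [hseen₁, hlen]
      have hcnt₁ : seen₁.count true = seen.count true + 1 := count_set_true hmi hb
      have hcle : seen₁.count true ≤ seen₁.length := List.count_le_length
      obtain ⟨seen', new, heq, hlen', hvp', hnew', hcl', hcnt'⟩ :=
        ih ((m * 10) % k) seen₁ (acc ++ [m]) hlen₁
          (Int.emod_nonneg _ (by omega)) (Int.emod_lt_of_pos _ hk0)
          (by
            intro x hx
            rcases (hvp₁ x).1 hx with hx' | rfl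
            · rcases hcl x hx' with h10 | h10
              · exact Or.inl ((hvp₁ _).2 (Or.inl h10))
              · exact Or.inl (h10 ▸ hvm₁)
            · exact Or.inr rfl)
          (by omega)
      refine ⟨seen', m :: new, ?_, hlen', ?_, ?_, hcl', by omega⟩
      · rw [heq, List.append_assoc]; rfl
      · intro x
        rw [hvp' x, hvp₁ x]
        constructor
        · rintro ((hx | rfl) | ⟨j, rfl⟩)
          · exact Or.inl hx
          · exact Or.inr ⟨0, rfl⟩
          · exact Or.inr ⟨j + 1, (mulIter_shift k j m).symm⟩
        · rintro (hx | ⟨j, rfl⟩)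
          · exact Or.inl (Or.inl hx)
          · match j with
            | 0 => exact Or.inl (Or.inr rfl)
            | j + 1 => exact Or.inr ⟨j, (mulIter_shift k j m)⟩
      · intro x
        simp only [List.mem_cons, hnew' x]
        constructor
        · rintro (rfl | ⟨hx', hx₁⟩)
          · refine ⟨(hvp' x).2 (Or.inl hvm₁), ?_⟩
            rintro ⟨_, hx⟩
            rw [hx] at hb; simp at hb
          · exact ⟨hx', fun hx => hx₁ ((hvp₁ x).2 (Or.inl hx))⟩
        · rintro ⟨hx', hxn⟩
          by_cases hxm : x = m
          · exact Or.inl hxm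
          · refine Or.inr ⟨hx', fun hx₁ => ?_⟩
            rcases (hvp₁ x).1 hx₁ with h | h
            · exact hxn h
            · exact hxm h
    · rw [if_neg hb]
      have hbt : seen.getD m.toNat false = true := by
        cases h : seen.getD m.toNat false
        · exact absurd h hb
        · rfl
      have hvm : pvVp seen m := ⟨hm0, hbt⟩
      have hiter : ∀ j, pvVp seen (pvMulIter k j m) := by
        intro j
        induction j with
        | zero => exact hvm
        | succ j ihj =>
          rcases hcl _ ihj with h10 | h10
          · exact h10
          · simpa only [pvMulIter, h10] using hvm
      refine ⟨seen, [], by simp, hlen, ?_, by simp, ?_, le_refl _⟩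
      · intro x
        constructor
        · exact fun h => Or.inl h
        · rintro (h | ⟨j, rfl⟩)
          · exact h
          · exact hiter j
      · intro x hx
        rcases hcl x hx with h10 | h10
        · exact h10
        · exact h10 ▸ hvm

theorem foldB_spec {k : Int} (hk : 2 ≤ k) :
    ∀ (level : List Int) (seen : List Bool) (acc : List Int),
      seen.length = k.toNat →
      (∀ x ∈ level, 0 ≤ x ∧ x < k) →
      (∀ x, pvVp seen x → pvVp seen ((x * 10) % k)) →
      ∃ seen' new,
        level.foldl
          (fun (p : List Bool × List Int) x => chainB k (k.toNat + 1) (PySem.Int.mod (x + 1) k) p.1 p.2)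
          (seen, acc) = (seen', acc ++ new) ∧
        seen'.length = k.toNat ∧
        (∀ x, pvVp seen' x ↔ (pvVp seen x ∨ ∃ j y, y ∈ level ∧ x = pvMulIter k j ((y + 1) % k))) ∧
        (∀ x, x ∈ new ↔ (pvVp seen' x ∧ ¬ pvVp seen x)) ∧
        (∀ x, pvVp seen' x → pvVp seen' ((x * 10) % k)) := by
  intro level
  induction level with
  | nil =>
    intro seen acc hlen _ hcl
    exact ⟨seen, [], by simp, hlen, by simp, by simp, hcl⟩
  | cons y level ihl =>
    intro seen acc hlen hrng hcl
    have hk0 : (0 : Int) < k := by omega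
    obtain ⟨hy0, hyk⟩ := hrng y (List.mem_cons_self)
    simp only [List.foldl_cons]
    obtain ⟨seen₁, new₁, heq₁, hlen₁, hvp₁, hnew₁, hcl₁, _⟩ :=
      chainB_spec hk (k.toNat + 1) ((y + 1) % k) seen acc hlen
        (Int.emod_nonneg _ (by omega)) (Int.emod_lt_of_pos _ hk0)
        (fun x hx => Or.inl (hcl x hx)) (by omega)
    rw [show chainB k (k.toNat + 1) (PySem.Int.mod (y + 1) k) seen acc = (seen₁, acc ++ new₁) from by
      rw [PySem.Int.mod_eq_emod_of_pos hk0]; exact heq₁]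
    obtain ⟨seen', new₂, heq₂, hlen', hvp', hnew', hcl'⟩ :=
      ihl seen₁ (acc ++ new₁) hlen₁ (fun x hx => hrng x (List.mem_cons_of_mem _ hx)) hcl₁
    refine ⟨seen', new₁ ++ new₂, by rw [heq₂, List.append_assoc], hlen', ?_, ?_, hcl'⟩
    · intro x
      rw [hvp' x]
      constructor
      · rintro (hx | ⟨j, y', hy', rfl⟩)
        · rcases (hvp₁ x).1 hx with hx' | ⟨j, rfl⟩
          · exact Or.inl hx'
          · exact Or.inr ⟨j, y, List.mem_cons_self, rfl⟩
        · exact Or.inr ⟨j, y', List.mem_cons_of_mem _ hy', rfl⟩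
      · rintro (hx | ⟨j, y', hy', rfl⟩)
        · exact Or.inl ((hvp₁ x).2 (Or.inl hx))
        · rcases List.mem_cons.1 hy' with rfl | hy''
          · exact Or.inl ((hvp₁ _).2 (Or.inr ⟨j, rfl⟩))
          · exact Or.inr ⟨j, y', hy'', rfl⟩
    · intro x
      have hmono₁ : pvVp seen x → pvVp seen₁ x := fun h => (hvp₁ x).2 (Or.inl h)
      have hmono₂ : pvVp seen₁ x → pvVp seen' x := fun h => (hvp' x).2 (Or.inl h)
      rw [List.mem_append, hnew₁ x, hnew' x]
      constructor
      · rintro (⟨h1, h0⟩ | ⟨h2, h1⟩)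
        · exact ⟨hmono₂ h1, h0⟩
        · exact ⟨h2, fun h0 => h1 (hmono₁ h0)⟩
      · rintro ⟨h2, h0⟩
        by_cases h1 : pvVp seen₁ x
        · exact Or.inl ⟨h1, h0⟩
        · exact Or.inr ⟨h2, h1⟩

theorem loopB_spec {k : Int} (hk : 2 ≤ k) :
    ∀ (fuel : Nat) (ℓ : Nat) (level : List Int) (seen : List Bool),
      seen.length = k.toNat →
      (∀ m, pvVp seen m ↔ PvLv k ℓ m) →
      (∀ x, x ∈ level ↔ (PvLv k ℓ x ∧ ¬ ∃ c < ℓ, PvLv k c x)) →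
      (¬ ∃ c < ℓ, PvLv k c 0) →
      pvD k + 1 - ℓ ≤ fuel →
      bfsLoopB k fuel level seen ((ℓ : Int) + 1) = (pvD k : Int) + 1 := by
  intro fuel
  induction fuel with
  | zero =>
    intro ℓ level seen _ _ _ hnot hfuel
    exfalso
    have hℓD : ℓ ≤ pvD k := by
      by_contra h
      exact hnot ⟨pvD k, by omega, pvD_lv hk⟩
    omega
  | succ fuel ih =>
    intro ℓ level seen hlen hvp hlev hnot hfuel
    have hℓD : ℓ ≤ pvD k := by
      by_contra h
      exact hnot ⟨pvD k, by omega, pvD_lv hk⟩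
    match hlevel : level with
    | [] =>
      exfalso
      have hsat : ∀ m, PvLv k ℓ m → ∃ c < ℓ, PvLv k c m := by
        intro m hm
        by_contra hP
        exact (List.not_mem_nil (a := m)) ((hlev m).2 ⟨hm, hP⟩)
      exact hnot (lv_sat hk ℓ hsat)
    | a :: lt =>
      simp only [bfsLoopB]
      by_cases h0lev : (0 : Int) ∈ a :: lt
      · rw [if_pos h0lev]
        obtain ⟨h0ℓ, h0not⟩ := (hlev 0).1 h0lev
        rw [pvD_eq hk h0ℓ h0not]
      · rw [if_neg h0lev]
        obtain ⟨seen', nxt, heq, hlen', hvp', hnew', _⟩ :=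
          foldB_spec hk (a :: lt) seen [] hlen
            (fun x hx => lv_range hk ((hlev x).1 hx).1)
            (fun x hx => (hvp _).2 (PvLv.mul ((hvp x).1 hx)))
        have hvpLv : ∀ x, pvVp seen x ↔ PvLv k ℓ x := hvp
        rw [heq]
        simp only [List.nil_append]
        have h0Lv : ¬ PvLv k ℓ 0 := by
          intro h0
          exact h0lev ((hlev 0).2 ⟨h0, hnot⟩)
        have hvp'' : ∀ m, pvVp seen' m ↔ PvLv k (ℓ + 1) m := by
          intro m
          rw [hvp' m, lv_recurrence ℓ m]
          constructor
          · rintro (hx | ⟨j, y, hy, rfl⟩)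
            · exact Or.inl ((hvpLv m).1 hx)
            · exact Or.inr ⟨j, y, (hlev y).1 hy, rfl⟩
          · rintro (hx | ⟨j, y, hy, rfl⟩)
            · exact Or.inl ((hvpLv m).2 hx)
            · exact Or.inr ⟨j, y, (hlev y).2 hy, rfl⟩
        have hDne : pvD k ≠ ℓ := by
          intro hE
          exact h0Lv (hE ▸ pvD_lv hk)
        have hres := ih (ℓ + 1) nxt seen' hlen' hvp''
          (by
            intro x
            rw [hnew' x, hvp'' x, hvpLv x]
            constructor
            · rintro ⟨h1, h0⟩
              refine ⟨h1, ?_⟩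
              rintro ⟨c, hc, hx⟩
              exact h0 (lv_mono_le (by omega) hx)
            · rintro ⟨h1, h0⟩
              exact ⟨h1, fun hx => h0 ⟨ℓ, by omega, hx⟩⟩)
          (by
            rintro ⟨c, hc, h0⟩
            rcases Nat.lt_or_ge c ℓ with h | h
            · exact hnot ⟨c, h, h0⟩
            · exact h0Lv (lv_mono_le (by omega) h0))
          (by omega)
        rw [show ((ℓ : Int) + 1 + 1) = (((ℓ + 1 : Nat) : Int) + 1) from by push_cast; ring]
        exact hres

theorem bfs_alt_eq {k : Int} (hk : 2 ≤ k) : bfs_alt k = (pvD k : Int) + 1 := by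
  obtain ⟨seen1, lvl, heq, hlen1, hvp1, hnew1, _, _⟩ :=
    chainB_spec hk (k.toNat + 1) 1 (List.replicate k.toNat false) [] (by simp) (by omega)
      (by omega) (fun x hx => absurd hx (vp_replicate _ x)) (by simp)
  have hvpz : ∀ m, pvVp seen1 m ↔ PvLv k 0 m := by
    intro m
    rw [hvp1 m, lv_zero]
    constructor
    · rintro (hx | hx)
      · exact absurd hx (vp_replicate _ m)
      · exact hx
    · exact fun hx => Or.inr hx
  have hres := loopB_spec hk (k.toNat + 2) 0 lvl seen1 hlen1 hvpz
    (by
      intro x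
      rw [hnew1 x, hvpz x]
      simp [vp_replicate])
    (by simp)
    (by have := pvD_le hk; omega)
  unfold bfs_alt
  rw [heq]
  simpa using hres

-- ===== VERDICT (by name: the statement is the Claim_ definition above) =====
theorem bfs_spec : Claim_equal_bfs := by
  intro k _ hpre
  unfold Spec_bfs
  rw [bfs_eq hpre, bfs_alt_eq hpre]
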